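-- pv_equiv track=rewrite | github.com/bevolpi/algoritmos-2-sem-python | Provas/Prova2/01_risada.py | haha
-- ===== SOURCE A (Python) =====
-- def haha(palavra):
--     palavra_vogais = ""
--     for letra in palavra:
--         if letra in "aeiou":
--             palavra_vogais += letra
--
--     if palavra_vogais == palavra_vogais[::-1]:
--         return True
--     else:
--         return False
-- ===== SOURCE B (Python) =====
-- def haha(palavra):
--     vogais = [c for c in palavra if c in "aeiou"]
--     lo, hi = 0, len(vogais) - 1
--     while lo < hi:
--         if vogais[lo] != vogais[hi]:
--             return False
--         lo += 1
--         hi -= 1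
--     return True
-- ===== Notes on version B (the rewrite author's own statement) =====
-- stated objective: alternative
-- what changed: Replaces building the vowel string and comparing it to its full reversed copy with a two-pointer converging-index scan over the collected vowels that exits on the first mismatch and never materialises a reversed sequence.
import Mathlib
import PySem

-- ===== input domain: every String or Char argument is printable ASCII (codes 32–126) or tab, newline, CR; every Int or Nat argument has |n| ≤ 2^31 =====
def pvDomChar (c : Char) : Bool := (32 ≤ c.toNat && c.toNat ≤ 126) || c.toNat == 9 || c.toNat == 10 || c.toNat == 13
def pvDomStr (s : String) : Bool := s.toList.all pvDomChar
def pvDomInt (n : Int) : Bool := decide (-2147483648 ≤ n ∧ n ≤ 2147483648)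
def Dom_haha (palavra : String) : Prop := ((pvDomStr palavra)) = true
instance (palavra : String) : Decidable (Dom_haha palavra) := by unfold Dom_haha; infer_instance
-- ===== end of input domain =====

-- B replaces reverse-and-compare with a two-pointer converging scan over the collected vowels (alternative decomposition, same cost).

-- ===== PORT A =====
-- builds the vowel string by appending, then compares it with its [::-1] slice
def haha (palavra : String) : Bool :=
  let palavra_vogais := palavra.toList.foldl
    (fun acc letra => if "aeiou".toList.contains letra then acc ++ [letra] else acc) []
  if some palavra_vogais == PySem.List.slice? palavra_vogais none none (-1) then true else false

-- ===== PORT B =====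
-- two-pointer loop; vogais[lo]/vogais[hi] are in range whenever lo < hi ≤ len-1, so getD is exact here
def twoPtr (vs : List Char) (lo hi : Nat) : Bool :=
  if lo < hi then
    if vs.getD lo ' ' == vs.getD hi ' ' then twoPtr vs (lo + 1) (hi - 1) else false
  else true
termination_by hi - lo
decreasing_by omega

def haha_alt (palavra : String) : Bool :=
  let vogais := palavra.toList.filter (fun c => "aeiou".toList.contains c)
  twoPtr vogais 0 (vogais.length - 1)

-- ===== PRECONDITION & SPEC =====
def Spec_haha (palavra : String) (out : Bool) : Prop := out = haha_alt palavra
instance (palavra : String) (out : Bool) : Decidable (Spec_haha palavra out) := by unfold Spec_haha; infer_instance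

-- ===== CLAIM (what is proved, stated in full; the proofs are below) =====
def Claim_equal_haha : Prop := ∀ (palavra : String), Dom_haha palavra → Spec_haha palavra (haha palavra)

-- ===== LEMMAS AND PROOFS =====

lemma twoPtr_aux (l : List Char) : ∀ (n lo hi : Nat), hi - lo ≤ n →
    (twoPtr l lo hi = true ↔
      ∀ i, lo ≤ i → i ≤ hi → l.getD i ' ' = l.getD (lo + hi - i) ' ') := by
  intro n
  induction n with
  | zero =>
      intro lo hi hle
      have hge : ¬ lo < hi := by omega
      rw [twoPtr, if_neg hge]
      constructor
      · intro _ i h1 h2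
        have : i = lo ∧ lo = hi := by omega
        obtain ⟨rfl, rfl⟩ := this
        congr 1; omega
      · intro _; rfl
  | succ n ihn =>
      intro lo hi hle
      by_cases hlt : lo < hi
      case neg =>
        rw [twoPtr, if_neg hlt]
        constructor
        · intro _ i h1 h2
          have : i = lo ∧ lo = hi := by omega
          obtain ⟨rfl, rfl⟩ := this
          congr 1; omega
        · intro _; rfl
      case pos =>
        by_cases heq : l.getD lo ' ' == l.getD hi ' '
        case neg =>
          rw [twoPtr, if_pos hlt, if_neg heq]
          simp only [Bool.false_eq_true, false_iff]
          intro h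
          have := h lo (le_refl _) (by omega)
          rw [Nat.add_sub_cancel_left] at this
          exact heq (by exact_mod_cast beq_iff_eq.mpr this)
        case pos =>
          have ih := ihn (lo + 1) (hi - 1) (by omega)
          rw [twoPtr, if_pos hlt, if_pos heq, ih]
          have heq' : l.getD lo ' ' = l.getD hi ' ' := by exact_mod_cast beq_iff_eq.mp heq
          constructor
          · intro h i h1 h2
            rcases Nat.lt_or_ge i hi with hih | hih
            · rcases Nat.eq_or_lt_of_le h1 with rfl | hlo
              · simpa [Nat.add_sub_cancel_left] using heq'
              · have := h i (by omega) (by omega)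
                have e : lo + 1 + (hi - 1) - i = lo + hi - i := by omega
                rwa [e] at this
            · have hieq : i = hi := by omega
              rw [hieq]
              have e : lo + hi - hi = lo := by omega
              rw [e]; exact heq'.symm
          · intro h i h1 h2
            have := h i (by omega) (by omega)
            have e : lo + 1 + (hi - 1) - i = lo + hi - i := by omega
            rwa [← e] at this

lemma twoPtr_eq_true_iff (l : List Char) (lo hi : Nat) :
    twoPtr l lo hi = true ↔
      ∀ i, lo ≤ i → i ≤ hi → l.getD i ' ' = l.getD (lo + hi - i) ' ' :=
  twoPtr_aux l (hi - lo) lo hi (le_refl _)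

lemma pal_iff (l : List Char) :
    l = l.reverse ↔ ∀ i, i < l.length → l.getD i ' ' = l.getD (l.length - 1 - i) ' ' := by
  constructor
  · intro h i hi
    conv_lhs => rw [h]
    rw [List.getD_eq_getElem _ _ (by simpa using hi), List.getD_eq_getElem _ _ (by omega)]
    simp [List.getElem_reverse]
  · intro h
    apply List.ext_getElem (by simp)
    intro i h1 h2
    have := h i h1
    rw [List.getD_eq_getElem _ _ h1, List.getD_eq_getElem _ _ (by omega)] at this
    rw [this]
    simp [List.getElem_reverse]

lemma twoPtr_pal (l : List Char) : twoPtr l 0 (l.length - 1) = true ↔ l = l.reverse := by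
  rw [twoPtr_eq_true_iff, pal_iff]
  rcases Nat.eq_zero_or_pos l.length with h0 | hpos
  · constructor
    · intro _ i hi; omega
    · intro _ i _ h2
      have hnil : l = [] := List.length_eq_zero_iff.mp h0
      simp [hnil]
  · constructor
    · intro h i hi
      have := h i (by omega) (by omega)
      have e : 0 + (l.length - 1) - i = l.length - 1 - i := by omega
      rwa [e] at this
    · intro h i _ h2
      have := h i (by omega)
      have e : 0 + (l.length - 1) - i = l.length - 1 - i := by omega
      rwa [← e] at this

-- ===== VERDICT (by name: the statement is the Claim_ definition above) =====
theorem haha_spec : Claim_equal_haha := by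
  intro palavra _
  unfold Spec_haha haha haha_alt
  simp only [PySem.List.foldl_append_if_eq_filter, List.nil_append,
    PySem.List.slice?_none_none_neg_one]
  set F := palavra.toList.filter (fun c => "aeiou".toList.contains c) with hF
  by_cases hp : F = F.reverse
  · rw [(twoPtr_pal F).mpr hp]
    simp [← hp]
  · have ht : twoPtr F 0 (F.length - 1) = false := by
      rw [← Bool.not_eq_true, twoPtr_pal]; exact hp
    rw [ht]
    simp [hp]
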